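-- pv_equiv track=rewrite | github.com/kglvzh/program | lab3100.py | another_date
-- ===== SOURCE A (Python) =====
-- def is_leap(year):
--     """Является ли 'year' високосным годом?
--
--     Параметры:
--         year (int): Год.
--
--     Результат:
--         bool: True - да, False - нет.
--     """
--     return (year % 4 == 0 and year % 100 != 0) or (year % 400 == 0)
--
-- def days(month, year):
--     """Вернуть количество дней в месяце 'month' года 'year'.
--
--     Параметры:
--         - month (int): Месяц.
--         - year (int): Год.
--
--     Результат:
--         int: Количество дней в месяце.
--     """
--     if month == 2:
--         return 29 if is_leap(year) else 28
--     elif month in [4, 6, 9, 11]: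
--         return 30
--     else:
--         return 31
--
-- def another_date(day, month, year, delta=1):
--     """Вернуть день, месяц, год, отличающийся на 'delta' дней.
--
--     Параметры:
--         - day (int): День.
--         - month (int): Месяц.
--         - year (int): Год.
--         - delta (int): Количество дней для добавления (положительное) или вычитания (отрицательное).
--
--     Результат:
--         (day, month, year) новой даты.
--     """
--
--     def previous_date(day, month, year):
--         """Вернуть день, месяц, год предыдущего дня.
--
--         Параметры:
--             - day (int): День.
--             - month (int): Месяц.
--             - year (int): Год.
--
--         Результат:
--             (day, month, year) предыдущего дня.
--         """
--         if day > 1: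
--             return day - 1, month, year
--         else:
--             if month == 1:
--                 return 31, 12, year - 1
--             else:
--                 prev_month = month - 1
--                 prev_days = days(prev_month, year)
--                 return prev_days, prev_month, year
--
--
--     def next_date(day, month, year):
--         """Вернуть день, месяц, год следующего дня.
--
--         Параметры:
--             - day (int): День.
--             - month (int): Месяц.
--             - year (int): Год.
--
--         Результат:
--             (day, month, year) следующего дня.
--         """
--         days_in_month = days(month, year)
--         if day < days_in_month:
--             return day + 1, month, year
--         else:
--             if month == 12:
--                 return 1, 1, year + 1
--             else:
--                 return 1, month + 1, year
--
--
--     current_day, current_month, current_year = day, month, year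
--
--     if delta > 0:
--         for _ in range(delta):
--             current_day, current_month, current_year = next_date(current_day, current_month, current_year)
--     elif delta < 0:
--         for _ in range(abs(delta)):
--             current_day, current_month, current_year = previous_date(current_day, current_month, current_year)
--
--     return current_day, current_month, current_year
-- ===== SOURCE B (Python) =====
-- def _is_leap(year):
--     return (year % 4 == 0 and year % 100 != 0) or (year % 400 == 0)
--
--
-- def _days(month, year):
--     if month == 2:
--         return 29 if _is_leap(year) else 28
--     elif month in [4, 6, 9, 11]:
--         return 30
--     else:
--         return 31
--
--
-- def _year_days(year):
--     return 366 if _is_leap(year) else 365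
--
--
-- def another_date(day, month, year, delta=1):
--     d, m, y = day, month, year
--     if delta > 0:
--         r = delta
--         # leave the current month in one jump
--         t = max(_days(m, y) - d, 0) + 1
--         if r < t:
--             return d + r, m, y
--         r -= t
--         if m == 12:
--             m, y = 1, y + 1
--         else:
--             m += 1
--         # now at day 1 of month m; skip whole years, then whole months
--         while True:
--             if m == 1 and r >= _year_days(y):
--                 r -= _year_days(y)
--                 y += 1
--             elif r >= _days(m, y):
--                 r -= _days(m, y)
--                 if m == 12:
--                     m, y = 1, y + 1
--                 else:
--                     m += 1
--             else:
--                 return 1 + r, m, y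
--     elif delta < 0:
--         r = -delta
--         # back out of the current month in one jump
--         t = max(d - 1, 0) + 1
--         if r < t:
--             return d - r, m, y
--         r -= t
--         if m == 1:
--             m, y = 12, y - 1
--         else:
--             m -= 1
--         # now at the last day of month m; skip whole years, then whole months
--         while True:
--             if m == 12 and r >= _year_days(y):
--                 r -= _year_days(y)
--                 y -= 1
--             elif r >= _days(m, y):
--                 r -= _days(m, y)
--                 if m == 1:
--                     m, y = 12, y - 1
--                 else:
--                     m -= 1
--             else:
--                 return _days(m, y) - r, m, y
--     else:
--         return day, month, year
-- ===== Notes on version B (the rewrite author's own statement) =====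
-- stated objective: faster
-- what changed: replaces A's day-by-day stepping loop (|delta| iterations of next/previous-day) with run-length jumps: one arithmetic step out of the current month, then whole-year and whole-month skips
import Mathlib
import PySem

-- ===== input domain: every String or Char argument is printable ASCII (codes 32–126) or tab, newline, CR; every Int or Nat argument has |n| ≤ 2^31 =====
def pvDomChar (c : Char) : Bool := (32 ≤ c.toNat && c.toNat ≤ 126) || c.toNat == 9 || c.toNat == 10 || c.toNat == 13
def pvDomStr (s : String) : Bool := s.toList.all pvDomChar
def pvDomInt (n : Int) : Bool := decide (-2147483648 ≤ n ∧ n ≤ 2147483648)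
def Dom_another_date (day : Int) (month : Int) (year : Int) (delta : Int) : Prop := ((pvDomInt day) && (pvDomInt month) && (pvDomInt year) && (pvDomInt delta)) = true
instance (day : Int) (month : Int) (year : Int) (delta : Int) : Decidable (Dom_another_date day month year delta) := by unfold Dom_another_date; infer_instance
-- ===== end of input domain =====

-- B replaces A's day-by-day stepping loop by run-length jumps: it leaves the current month in
-- one arithmetic step and then skips whole years and whole months, doing ~1/30th of A's work.

-- ===== PORT A =====
def pvIsLeap (year : Int) : Bool :=
  (PySem.Int.mod year 4 == 0 && !(PySem.Int.mod year 100 == 0)) || PySem.Int.mod year 400 == 0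

def pvDays (month : Int) (year : Int) : Int :=
  if month = 2 then (if pvIsLeap year then 29 else 28)
  else if month = 4 ∨ month = 6 ∨ month = 9 ∨ month = 11 then 30
  else 31

def pvPreviousDate (day month year : Int) : Int × Int × Int :=
  if 1 < day then (day - 1, month, year)
  else if month = 1 then (31, 12, year - 1)
  else (pvDays (month - 1) year, month - 1, year)

def pvNextDate (day month year : Int) : Int × Int × Int :=
  if day < pvDays month year then (day + 1, month, year)
  else if month = 12 then (1, 1, year + 1)
  else (1, month + 1, year)

-- the `for _ in range(delta)` / `for _ in range(abs(delta))` loops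
def pvLoopNext : Nat → Int × Int × Int → Int × Int × Int
  | 0, s => s
  | k + 1, s => pvLoopNext k (pvNextDate s.1 s.2.1 s.2.2)

def pvLoopPrev : Nat → Int × Int × Int → Int × Int × Int
  | 0, s => s
  | k + 1, s => pvLoopPrev k (pvPreviousDate s.1 s.2.1 s.2.2)

def another_date (day : Int) (month : Int) (year : Int) (delta : Int) : List Int :=
  if 0 < delta then
    let s := pvLoopNext delta.toNat (day, month, year)
    [s.1, s.2.1, s.2.2]
  else if delta < 0 then
    let s := pvLoopPrev (|delta|).toNat (day, month, year)
    [s.1, s.2.1, s.2.2]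
  else [day, month, year]

-- ===== PORT B =====
def pvIsLeapB (year : Int) : Bool :=
  (PySem.Int.mod year 4 == 0 && !(PySem.Int.mod year 100 == 0)) || PySem.Int.mod year 400 == 0

def pvDaysB (month : Int) (year : Int) : Int :=
  if month = 2 then (if pvIsLeapB year then 29 else 28)
  else if month = 4 ∨ month = 6 ∨ month = 9 ∨ month = 11 then 30
  else 31

def pvYearDaysB (year : Int) : Int := if pvIsLeapB year then 366 else 365

-- every month has at least 28 days (cited by the termination proofs of the two loops)
theorem pvDaysB_ge (m y : Int) : 28 ≤ pvDaysB m y := by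
  unfold pvDaysB; split_ifs <;> norm_num

theorem pvYearDaysB_ge (y : Int) : 365 ≤ pvYearDaysB y := by
  unfold pvYearDaysB; split_ifs <;> norm_num

-- the forward `while True` loop of B: position is day 1 of month m of year y, r days remain
def pvFwdLoop (r m y : Int) : Int × Int × Int :=
  if h1 : m = 1 ∧ pvYearDaysB y ≤ r then
    pvFwdLoop (r - pvYearDaysB y) m (y + 1)
  else if h2 : pvDaysB m y ≤ r then
    if m = 12 then pvFwdLoop (r - pvDaysB m y) 1 (y + 1)
    else pvFwdLoop (r - pvDaysB m y) (m + 1) y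
  else (1 + r, m, y)
termination_by r.toNat
decreasing_by
  · have := pvYearDaysB_ge y; omega
  · have := pvDaysB_ge m y; omega
  · have := pvDaysB_ge m y; omega

-- the backward `while True` loop of B: position is the last day of month m of year y
def pvBwdLoop (r m y : Int) : Int × Int × Int :=
  if h1 : m = 12 ∧ pvYearDaysB y ≤ r then
    pvBwdLoop (r - pvYearDaysB y) m (y - 1)
  else if h2 : pvDaysB m y ≤ r then
    if m = 1 then pvBwdLoop (r - pvDaysB m y) 12 (y - 1)
    else pvBwdLoop (r - pvDaysB m y) (m - 1) y
  else (pvDaysB m y - r, m, y)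
termination_by r.toNat
decreasing_by
  · have := pvYearDaysB_ge y; omega
  · have := pvDaysB_ge m y; omega
  · have := pvDaysB_ge m y; omega

def another_date_alt (day : Int) (month : Int) (year : Int) (delta : Int) : List Int :=
  if 0 < delta then
    let t := max (pvDaysB month year - day) 0 + 1
    if delta < t then [day + delta, month, year]
    else
      let s := if month = 12 then pvFwdLoop (delta - t) 1 (year + 1)
               else pvFwdLoop (delta - t) (month + 1) year
      [s.1, s.2.1, s.2.2]
  else if delta < 0 then
    let r := -delta
    let t := max (day - 1) 0 + 1
    if r < t then [day - r, month, year]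
    else
      let s := if month = 1 then pvBwdLoop (r - t) 12 (year - 1)
               else pvBwdLoop (r - t) (month - 1) year
      [s.1, s.2.1, s.2.2]
  else [day, month, year]

-- ===== PRECONDITION & SPEC =====
def Spec_another_date (day : Int) (month : Int) (year : Int) (delta : Int) (out : List Int) : Prop := out = another_date_alt day month year delta
instance (day : Int) (month : Int) (year : Int) (delta : Int) (out : List Int) : Decidable (Spec_another_date day month year delta out) := by unfold Spec_another_date; infer_instance

-- ===== CLAIM (what is proved, stated in full; the proofs are below) =====
def Claim_equal_another_date : Prop := ∀ (day : Int) (month : Int) (year : Int) (delta : Int), Dom_another_date day month year delta → Spec_another_date day month year delta (another_date day month year delta)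

-- ===== LEMMAS AND PROOFS =====

theorem pvDaysB_eq (m y : Int) : pvDaysB m y = pvDays m y := rfl

theorem loopNext_add (a b : Nat) (s : Int × Int × Int) :
    pvLoopNext (a + b) s = pvLoopNext b (pvLoopNext a s) := by
  induction a generalizing s with
  | zero => simp [pvLoopNext]
  | succ n ih =>
    have h : n + 1 + b = (n + b) + 1 := by omega
    rw [h, pvLoopNext, pvLoopNext, ih]

theorem loopPrev_add (a b : Nat) (s : Int × Int × Int) :
    pvLoopPrev (a + b) s = pvLoopPrev b (pvLoopPrev a s) := by
  induction a generalizing s with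
  | zero => simp [pvLoopPrev]
  | succ n ih =>
    have h : n + 1 + b = (n + b) + 1 := by omega
    rw [h, pvLoopPrev, pvLoopPrev, ih]

theorem loopNext_linear (k : Nat) (d m y : Int) (h : (k : Int) ≤ pvDays m y - d) :
    pvLoopNext k (d, m, y) = (d + k, m, y) := by
  induction k generalizing d with
  | zero => simp [pvLoopNext]
  | succ n ih =>
    rw [pvLoopNext]
    have hlt : d < pvDays m y := by push_cast at h; omega
    simp only [pvNextDate, if_pos hlt]
    rw [ih (d + 1) (by push_cast at h ⊢; omega)]
    refine Prod.ext ?_ rfl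
    push_cast; ring

theorem loopPrev_linear (k : Nat) (d m y : Int) (h : (k : Int) ≤ d - 1) :
    pvLoopPrev k (d, m, y) = (d - k, m, y) := by
  induction k generalizing d with
  | zero => simp [pvLoopPrev]
  | succ n ih =>
    rw [pvLoopPrev]
    have hgt : 1 < d := by push_cast at h; omega
    simp only [pvPreviousDate, if_pos hgt]
    rw [ih (d - 1) (by push_cast at h ⊢; omega)]
    refine Prod.ext ?_ rfl
    push_cast; ring

-- crossing out of the current month in one run
theorem hop_next (d m y : Int) :
    pvLoopNext (max (pvDays m y - d) 0 + 1).toNat (d, m, y) =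
      (1, if m = 12 then 1 else m + 1, if m = 12 then y + 1 else y) := by
  by_cases hd : d ≤ pvDays m y
  · have h1 : (max (pvDays m y - d) 0 + 1).toNat = (pvDays m y - d).toNat + 1 := by omega
    rw [h1, loopNext_add, loopNext_linear _ d m y (by omega)]
    have h2 : d + ((pvDays m y - d).toNat : Int) = pvDays m y := by omega
    rw [h2, pvLoopNext, pvLoopNext]
    simp only [pvNextDate, if_neg (lt_irrefl (pvDays m y))]
    split_ifs <;> rfl
  · have h1 : (max (pvDays m y - d) 0 + 1).toNat = 1 := by omega
    rw [h1, pvLoopNext, pvLoopNext]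
    simp only [pvNextDate, if_neg (by omega : ¬ d < pvDays m y)]
    split_ifs <;> rfl

-- leaving a whole month from its first day
theorem hop_one (m y : Int) :
    pvLoopNext (pvDays m y).toNat (1, m, y) =
      (1, if m = 12 then 1 else m + 1, if m = 12 then y + 1 else y) := by
  have h := hop_next 1 m y
  have hd := pvDaysB_ge m y
  rw [pvDaysB_eq] at hd
  have h1 : (max (pvDays m y - 1) 0 + 1).toNat = (pvDays m y).toNat := by omega
  rw [h1] at h
  exact h

-- crossing back out of the current month in one run
theorem hop_prev (d m y : Int) :
    pvLoopPrev (max (d - 1) 0 + 1).toNat (d, m, y) =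
      (pvDays (if m = 1 then 12 else m - 1) (if m = 1 then y - 1 else y),
       if m = 1 then 12 else m - 1, if m = 1 then y - 1 else y) := by
  by_cases hd : 1 ≤ d
  · have h1 : (max (d - 1) 0 + 1).toNat = (d - 1).toNat + 1 := by omega
    rw [h1, loopPrev_add, loopPrev_linear _ d m y (by omega)]
    have h2 : d - ((d - 1).toNat : Int) = 1 := by omega
    rw [h2, pvLoopPrev, pvLoopPrev]
    simp only [pvPreviousDate]
    split_ifs <;> first | omega | rfl | norm_num [pvDays]
  · have h1 : (max (d - 1) 0 + 1).toNat = 1 := by omega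
    rw [h1, pvLoopPrev, pvLoopPrev]
    simp only [pvPreviousDate, if_neg (by omega : ¬ 1 < d)]
    split_ifs <;> first | omega | rfl | norm_num [pvDays]

theorem pvIsLeapB_eq (y : Int) : pvIsLeapB y = pvIsLeap y := rfl

-- a whole year forward from January 1st
theorem year_next (y : Int) :
    pvLoopNext (pvYearDaysB y).toNat (1, 1, y) = (1, 1, y + 1) := by
  have tail : pvLoopNext 306 (1, 3, y) = (1, 1, y + 1) := by
    have s3 : pvLoopNext 31 (1, 3, y) = (1, 4, y) := by
      have h := hop_one 3 y; norm_num [pvDays] at h; exact h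
    have s4 : pvLoopNext 30 (1, 4, y) = (1, 5, y) := by
      have h := hop_one 4 y; norm_num [pvDays] at h; exact h
    have s5 : pvLoopNext 31 (1, 5, y) = (1, 6, y) := by
      have h := hop_one 5 y; norm_num [pvDays] at h; exact h
    have s6 : pvLoopNext 30 (1, 6, y) = (1, 7, y) := by
      have h := hop_one 6 y; norm_num [pvDays] at h; exact h
    have s7 : pvLoopNext 31 (1, 7, y) = (1, 8, y) := by
      have h := hop_one 7 y; norm_num [pvDays] at h; exact h
    have s8 : pvLoopNext 31 (1, 8, y) = (1, 9, y) := by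
      have h := hop_one 8 y; norm_num [pvDays] at h; exact h
    have s9 : pvLoopNext 30 (1, 9, y) = (1, 10, y) := by
      have h := hop_one 9 y; norm_num [pvDays] at h; exact h
    have s10 : pvLoopNext 31 (1, 10, y) = (1, 11, y) := by
      have h := hop_one 10 y; norm_num [pvDays] at h; exact h
    have s11 : pvLoopNext 30 (1, 11, y) = (1, 12, y) := by
      have h := hop_one 11 y; norm_num [pvDays] at h; exact h
    have s12 : pvLoopNext 31 (1, 12, y) = (1, 1, y + 1) := by
      have h := hop_one 12 y; norm_num [pvDays] at h; exact h
    rw [show (306 : Nat) = 31 + (30 + (31 + (30 + (31 + (31 + (30 + (31 + (30 + (31))))))))) from by norm_num]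
    rw [loopNext_add, s3]
    rw [loopNext_add, s4]
    rw [loopNext_add, s5]
    rw [loopNext_add, s6]
    rw [loopNext_add, s7]
    rw [loopNext_add, s8]
    rw [loopNext_add, s9]
    rw [loopNext_add, s10]
    rw [loopNext_add, s11]
    exact s12
  have s1 : pvLoopNext 31 (1, 1, y) = (1, 2, y) := by
    have h := hop_one 1 y; norm_num [pvDays] at h; exact h
  by_cases hl : pvIsLeap y
  · have hf : pvLoopNext 29 (1, 2, y) = (1, 3, y) := by
      have h := hop_one 2 y; norm_num [pvDays, hl] at h; exact h
    have hyd : (pvYearDaysB y).toNat = 366 := by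
      simp [pvYearDaysB, pvIsLeapB_eq, hl]
    rw [hyd, show (366 : Nat) = 31 + (29 + 306) from by norm_num,
        loopNext_add, s1, loopNext_add, hf, tail]
  · have hf : pvLoopNext 28 (1, 2, y) = (1, 3, y) := by
      have h := hop_one 2 y; norm_num [pvDays, hl] at h; exact h
    have hyd : (pvYearDaysB y).toNat = 365 := by
      simp [pvYearDaysB, pvIsLeapB_eq, hl]
    rw [hyd, show (365 : Nat) = 31 + (28 + 306) from by norm_num,
        loopNext_add, s1, loopNext_add, hf, tail]

-- a whole year backward from December 31st
theorem year_prev (y : Int) :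
    pvLoopPrev (pvYearDaysB y).toNat (31, 12, y) = (31, 12, y - 1) := by
  have head : pvLoopPrev 275 (31, 12, y) = (31, 3, y) := by
    have b12 : pvLoopPrev 31 (31, 12, y) = (30, 11, y) := by
      have h := hop_prev 31 12 y; norm_num [pvDays] at h; exact h
    have b11 : pvLoopPrev 30 (30, 11, y) = (31, 10, y) := by
      have h := hop_prev 30 11 y; norm_num [pvDays] at h; exact h
    have b10 : pvLoopPrev 31 (31, 10, y) = (30, 9, y) := by
      have h := hop_prev 31 10 y; norm_num [pvDays] at h; exact h
    have b9 : pvLoopPrev 30 (30, 9, y) = (31, 8, y) := by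
      have h := hop_prev 30 9 y; norm_num [pvDays] at h; exact h
    have b8 : pvLoopPrev 31 (31, 8, y) = (31, 7, y) := by
      have h := hop_prev 31 8 y; norm_num [pvDays] at h; exact h
    have b7 : pvLoopPrev 31 (31, 7, y) = (30, 6, y) := by
      have h := hop_prev 31 7 y; norm_num [pvDays] at h; exact h
    have b6 : pvLoopPrev 30 (30, 6, y) = (31, 5, y) := by
      have h := hop_prev 30 6 y; norm_num [pvDays] at h; exact h
    have b5 : pvLoopPrev 31 (31, 5, y) = (30, 4, y) := by
      have h := hop_prev 31 5 y; norm_num [pvDays] at h; exact h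
    have b4 : pvLoopPrev 30 (30, 4, y) = (31, 3, y) := by
      have h := hop_prev 30 4 y; norm_num [pvDays] at h; exact h
    rw [show (275 : Nat) = 31 + (30 + (31 + (30 + (31 + (31 + (30 + (31 + (30)))))))) from by norm_num]
    rw [loopPrev_add, b12]
    rw [loopPrev_add, b11]
    rw [loopPrev_add, b10]
    rw [loopPrev_add, b9]
    rw [loopPrev_add, b8]
    rw [loopPrev_add, b7]
    rw [loopPrev_add, b6]
    rw [loopPrev_add, b5]
    exact b4
  have b1 : pvLoopPrev 31 (31, 1, y) = (31, 12, y - 1) := by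
    have h := hop_prev 31 1 y; norm_num [pvDays] at h; exact h
  by_cases hl : pvIsLeap y
  · have b3 : pvLoopPrev 31 (31, 3, y) = (29, 2, y) := by
      have h := hop_prev 31 3 y; norm_num [pvDays, hl] at h; exact h
    have bf : pvLoopPrev 29 (29, 2, y) = (31, 1, y) := by
      have h := hop_prev 29 2 y; norm_num [pvDays] at h; exact h
    have hyd : (pvYearDaysB y).toNat = 366 := by
      simp [pvYearDaysB, pvIsLeapB_eq, hl]
    rw [hyd, show (366 : Nat) = 275 + (31 + (29 + 31)) from by norm_num,
        loopPrev_add, head, loopPrev_add, b3, loopPrev_add, bf, b1]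
  · have b3 : pvLoopPrev 31 (31, 3, y) = (28, 2, y) := by
      have h := hop_prev 31 3 y; norm_num [pvDays, hl] at h; exact h
    have bf : pvLoopPrev 28 (28, 2, y) = (31, 1, y) := by
      have h := hop_prev 28 2 y; norm_num [pvDays] at h; exact h
    have hyd : (pvYearDaysB y).toNat = 365 := by
      simp [pvYearDaysB, pvIsLeapB_eq, hl]
    rw [hyd, show (365 : Nat) = 275 + (31 + (28 + 31)) from by norm_num,
        loopPrev_add, head, loopPrev_add, b3, loopPrev_add, bf, b1]

-- B's forward loop retraces A's day loop
theorem fwd_eq (r m y : Int) (h : 0 ≤ r) :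
    pvFwdLoop r m y = pvLoopNext r.toNat (1, m, y) := by
  have main : ∀ n : Nat, ∀ r m y : Int, 0 ≤ r → r.toNat ≤ n →
      pvFwdLoop r m y = pvLoopNext r.toNat (1, m, y) := by
    intro n
    induction n with
    | zero =>
      intro r m y h0 hle
      have hr : r = 0 := by omega
      subst hr
      unfold pvFwdLoop
      rw [dif_neg (by have := pvYearDaysB_ge y; omega),
          dif_neg (by have := pvDaysB_ge m y; omega)]
      norm_num [pvLoopNext]
    | succ n ih =>
      intro r m y h0 hle
      unfold pvFwdLoop
      by_cases h1 : m = 1 ∧ pvYearDaysB y ≤ r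
      · rw [dif_pos h1]
        obtain ⟨hm, hyd⟩ := h1
        subst hm
        have hyge := pvYearDaysB_ge y
        have hsplit : r.toNat = (pvYearDaysB y).toNat + (r - pvYearDaysB y).toNat := by omega
        rw [hsplit, loopNext_add, year_next]
        exact ih (r - pvYearDaysB y) 1 (y + 1) (by omega) (by omega)
      · rw [dif_neg h1]
        by_cases h2 : pvDaysB m y ≤ r
        · rw [dif_pos h2]
          rw [pvDaysB_eq] at h2
          have hdge := pvDaysB_ge m y
          rw [pvDaysB_eq] at hdge
          have hsplit : r.toNat = (pvDays m y).toNat + (r - pvDays m y).toNat := by omega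
          rw [hsplit, loopNext_add, hop_one]
          by_cases hm : m = 12
          · subst hm
            norm_num
            rw [pvDaysB_eq]
            exact ih (r - pvDays 12 y) 1 (y + 1) (by omega) (by omega)
          · rw [if_neg hm, if_neg hm, if_neg hm]
            rw [pvDaysB_eq]
            exact ih (r - pvDays m y) (m + 1) y (by omega) (by omega)
        · rw [dif_neg h2]
          rw [pvDaysB_eq] at h2
          rw [loopNext_linear r.toNat 1 m y (by omega)]
          have he : (1 : Int) + (r.toNat : Int) = 1 + r := by omega
          rw [he]
  exact main r.toNat r m y h le_rfl

-- B's backward loop retraces A's day loop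
theorem bwd_eq (r m y : Int) (h : 0 ≤ r) :
    pvBwdLoop r m y = pvLoopPrev r.toNat (pvDays m y, m, y) := by
  have main : ∀ n : Nat, ∀ r m y : Int, 0 ≤ r → r.toNat ≤ n →
      pvBwdLoop r m y = pvLoopPrev r.toNat (pvDays m y, m, y) := by
    intro n
    induction n with
    | zero =>
      intro r m y h0 hle
      have hr : r = 0 := by omega
      subst hr
      unfold pvBwdLoop
      rw [dif_neg (by have := pvYearDaysB_ge y; omega),
          dif_neg (by have := pvDaysB_ge m y; omega)]
      norm_num [pvLoopPrev, pvDaysB_eq]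
    | succ n ih =>
      intro r m y h0 hle
      unfold pvBwdLoop
      by_cases h1 : m = 12 ∧ pvYearDaysB y ≤ r
      · rw [dif_pos h1]
        obtain ⟨hm, hyd⟩ := h1
        subst hm
        have hyge := pvYearDaysB_ge y
        have hsplit : r.toNat = (pvYearDaysB y).toNat + (r - pvYearDaysB y).toNat := by omega
        have h31 : pvDays 12 y = 31 := by norm_num [pvDays]
        have h31' : pvDays 12 (y - 1) = 31 := by norm_num [pvDays]
        rw [hsplit, loopPrev_add, h31, year_prev]
        rw [ih (r - pvYearDaysB y) 12 (y - 1) (by omega) (by omega), h31']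
      · rw [dif_neg h1]
        by_cases h2 : pvDaysB m y ≤ r
        · rw [dif_pos h2]
          rw [pvDaysB_eq] at h2
          have hdge := pvDaysB_ge m y
          rw [pvDaysB_eq] at hdge
          have hsplit : r.toNat = (pvDays m y).toNat + (r - pvDays m y).toNat := by omega
          have hhop := hop_prev (pvDays m y) m y
          have hc : (max (pvDays m y - 1) 0 + 1).toNat = (pvDays m y).toNat := by omega
          rw [hc] at hhop
          rw [hsplit, loopPrev_add, hhop]
          by_cases hm : m = 1
          · subst hm
            norm_num
            rw [pvDaysB_eq]
            exact ih (r - pvDays 1 y) 12 (y - 1) (by omega) (by omega)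
          · rw [if_neg hm, if_neg hm, if_neg hm]
            rw [pvDaysB_eq]
            exact ih (r - pvDays m y) (m - 1) y (by omega) (by omega)
        · rw [dif_neg h2]
          rw [pvDaysB_eq] at h2
          rw [loopPrev_linear r.toNat (pvDays m y) m y (by omega), pvDaysB_eq]
          have he : pvDays m y - (r.toNat : Int) = pvDays m y - r := by omega
          rw [he]
  exact main r.toNat r m y h le_rfl

-- ===== VERDICT (by name: the statement is the Claim_ definition above) =====
theorem another_date_spec : Claim_equal_another_date := by
  intro day month year delta _
  unfold Spec_another_date another_date another_date_alt
  simp only [pvDaysB_eq]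
  by_cases hpos : 0 < delta
  · rw [if_pos hpos, if_pos hpos]
    by_cases hlt : delta < max (pvDays month year - day) 0 + 1
    · rw [if_pos hlt, loopNext_linear delta.toNat day month year (by omega)]
      have h : day + (delta.toNat : Int) = day + delta := by omega
      simp [h]
      all_goals omega
    · rw [if_neg hlt]
      set t := max (pvDays month year - day) 0 + 1 with ht
      have hsplit : delta.toNat = t.toNat + (delta - t).toNat := by omega
      rw [hsplit, loopNext_add]
      have hhop := hop_next day month year
      rw [← ht] at hhop
      rw [hhop]
      by_cases hm : month = 12
      · subst hm
        norm_num
        rw [fwd_eq (delta - t) 1 (year + 1) (by omega)]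
        exact ⟨rfl, rfl, rfl⟩
      · simp only [if_neg hm]
        rw [fwd_eq (delta - t) (month + 1) year (by omega)]
  · rw [if_neg hpos, if_neg hpos]
    by_cases hneg : delta < 0
    · rw [if_pos hneg, if_pos hneg]
      have habs : (|delta|).toNat = (-delta).toNat := by
        rw [abs_of_neg hneg]
      rw [habs]
      by_cases hlt : -delta < max (day - 1) 0 + 1
      · rw [if_pos hlt, loopPrev_linear (-delta).toNat day month year (by omega)]
        have h : day - ((-delta).toNat : Int) = day - -delta := by omega
        simp [h]
        all_goals omega
      · rw [if_neg hlt]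
        set t := max (day - 1) 0 + 1 with ht
        have hsplit : (-delta).toNat = t.toNat + (-delta - t).toNat := by omega
        rw [hsplit, loopPrev_add]
        have hhop := hop_prev day month year
        rw [← ht] at hhop
        rw [hhop]
        by_cases hm : month = 1
        · subst hm
          norm_num
          rw [bwd_eq (-delta - t) 12 (year - 1) (by omega)]
          exact ⟨rfl, rfl, rfl⟩
        · simp only [if_neg hm]
          rw [bwd_eq (-delta - t) (month - 1) year (by omega)]
    · rw [if_neg hneg, if_neg hneg]
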